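-- pv_equiv track=rewrite | github.com/danielhcertuche/Automated_ArmTracing_PolarSpace | pipeline_arm_tracing.py | _split_by_threshold
-- ===== SOURCE A (Python) =====
-- def _split_by_threshold(contours, thr):
--     out = []
--     for cnt in contours:
--         tmp = [cnt[0]]
--         for a, b in zip(cnt, cnt[1:]):
--             if abs(b[1]-a[1]) <= thr:
--                 tmp.append(b)
--             else:
--                 if len(tmp)>1: out.append(tmp)
--                 tmp = [b]
--         if len(tmp)>1: out.append(tmp)
--     return out
-- ===== SOURCE B (Python) =====
-- def _split_by_threshold(contours, thr):
--     out = []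
--     for cnt in contours:
--         n = len(cnt)
--         breaks = [i + 1 for i in range(n - 1) if abs(cnt[i + 1][1] - cnt[i][1]) > thr]
--         bounds = [0] + breaks + [n]
--         for s, e in zip(bounds, bounds[1:]):
--             seg = cnt[s:e]
--             if len(seg) > 1:
--                 out.append(seg)
--     return out
-- ===== Notes on version B (the rewrite author's own statement) =====
-- stated objective: alternative
-- what changed: B replaces A's incremental segment accumulator (growing tmp element by element with flushes) by a two-phase pass: first compute the list of break positions, then slice each contour at the boundary list [0]+breaks+[n] and keep slices of length > 1.
-- outside the precondition, e.g. on _split_by_threshold([[]], 0): A raises IndexError, B returns []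
import Mathlib
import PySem

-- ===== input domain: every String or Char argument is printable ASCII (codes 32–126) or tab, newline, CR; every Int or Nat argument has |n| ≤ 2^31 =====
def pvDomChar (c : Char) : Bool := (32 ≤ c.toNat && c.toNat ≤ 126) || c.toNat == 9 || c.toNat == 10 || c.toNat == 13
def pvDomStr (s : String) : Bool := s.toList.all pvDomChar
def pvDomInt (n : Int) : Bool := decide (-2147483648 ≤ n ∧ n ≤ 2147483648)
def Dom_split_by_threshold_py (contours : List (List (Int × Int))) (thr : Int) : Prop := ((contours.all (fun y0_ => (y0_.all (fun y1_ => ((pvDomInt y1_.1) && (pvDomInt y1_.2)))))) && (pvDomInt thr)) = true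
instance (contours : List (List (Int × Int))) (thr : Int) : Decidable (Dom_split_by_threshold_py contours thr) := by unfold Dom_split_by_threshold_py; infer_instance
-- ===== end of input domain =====

-- B splits each contour by first computing the break positions and then slicing at the
-- boundary list [0]+breaks+[n], instead of A's element-by-element accumulator with flushes
-- (objective: alternative decomposition, same cost). On a contours list containing an empty
-- contour A raises IndexError while B skips it (such inputs are outside Pre_).


-- ===== PORT A =====
-- literal transliteration of A: state (out, tmp); cnt[0] via pyGet? (in range under Pre_)
def split_by_threshold_py (contours : List (List (Int × Int))) (thr : Int) : List (List (Int × Int)) :=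
  contours.foldl (fun out cnt =>
    let st := (cnt.zip (PySem.List.slice cnt (some 1) none)).foldl
      (fun (st : List (List (Int × Int)) × List (Int × Int)) ab =>
        if |ab.2.2 - ab.1.2| ≤ thr then (st.1, st.2 ++ [ab.2])
        else (if st.2.length > 1 then st.1 ++ [st.2] else st.1, [ab.2]))
      (out, [(PySem.List.pyGet? cnt 0).getD (0, 0)])
    if st.2.length > 1 then st.1 ++ [st.2] else st.1) []

-- ===== PORT B =====
-- literal transliteration of B (Source B): breaks comprehension, boundary list, slice fold
def split_by_threshold_py_alt (contours : List (List (Int × Int))) (thr : Int) : List (List (Int × Int)) :=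
  contours.foldl (fun out cnt =>
    let n : Int := cnt.length
    let breaks : List Int :=
      ((PySem.List.pyRange 0 (n - 1) 1).filter (fun i =>
        decide (thr < |(PySem.List.pyGetD cnt (i + 1) (0, 0)).2 - (PySem.List.pyGetD cnt i (0, 0)).2|))).map (· + 1)
    let bounds : List Int := [0] ++ breaks ++ [n]
    (bounds.zip (PySem.List.slice bounds (some 1) none)).foldl (fun out se =>
      let seg := PySem.List.slice cnt (some se.1) (some se.2)
      if seg.length > 1 then out ++ [seg] else out) out) []

-- ===== PRECONDITION & SPEC =====
-- Pre_ excludes exactly the inputs where A raises IndexError: a contours list containing an empty contour.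
def Pre_split_by_threshold_py (contours : List (List (Int × Int))) (thr : Int) : Prop := [] ∉ contours
instance (contours : List (List (Int × Int))) (thr : Int) : Decidable (Pre_split_by_threshold_py contours thr) := by unfold Pre_split_by_threshold_py; infer_instance

def pvWitness_split_by_threshold_py : (List (List (Int × Int))) × Int := ([[(0, 0), (0, 1)], [(1, 0), (1, 5)]], 1)

def Spec_split_by_threshold_py (contours : List (List (Int × Int))) (thr : Int) (out : List (List (Int × Int))) : Prop := out = split_by_threshold_py_alt contours thr
instance (contours : List (List (Int × Int))) (thr : Int) (out : List (List (Int × Int))) : Decidable (Spec_split_by_threshold_py contours thr out) := by unfold Spec_split_by_threshold_py; infer_instance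

-- ===== CLAIM (what is proved, stated in full; the proofs are below) =====
def Claim_equal_split_by_threshold_py : Prop := ∀ (contours : List (List (Int × Int))) (thr : Int), Dom_split_by_threshold_py contours thr → Pre_split_by_threshold_py contours thr → Spec_split_by_threshold_py contours thr (split_by_threshold_py contours thr)
-- ===== LEMMAS AND PROOFS =====

-- reference segmentation: pvSplitFrom thr tmp a rest = the length>1 segments produced when the
-- current segment is tmp (last element a) and rest remains; pvBrk = 1-based break positions of a :: t
def pvSplitFrom (thr : Int) : List (Int × Int) → (Int × Int) → List (Int × Int) → List (List (Int × Int))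
  | tmp, _, [] => if tmp.length > 1 then [tmp] else []
  | tmp, a, b :: rest =>
    if |b.2 - a.2| ≤ thr then pvSplitFrom thr (tmp ++ [b]) b rest
    else (if tmp.length > 1 then [tmp] else []) ++ pvSplitFrom thr [b] b rest
def pvBrk (thr : Int) : (Int × Int) → List (Int × Int) → List Int
  | _, [] => []
  | a, b :: t => (if thr < |b.2 - a.2| then [(1 : Int)] else []) ++ (pvBrk thr b t).map (· + 1)

theorem pvMainA (thr : Int) (t : List (Int × Int)) : ∀ (a : Int × Int)
    (tmp : List (Int × Int)) (out : List (List (Int × Int))),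
    (let st := ((a :: t).zip t).foldl
      (fun (st : List (List (Int × Int)) × List (Int × Int)) ab =>
        if |ab.2.2 - ab.1.2| ≤ thr then (st.1, st.2 ++ [ab.2])
        else (if st.2.length > 1 then st.1 ++ [st.2] else st.1, [ab.2])) (out, tmp)
     if st.2.length > 1 then st.1 ++ [st.2] else st.1)
    = out ++ pvSplitFrom thr tmp a t := by
  induction t with
  | nil =>
    intro a tmp out
    simp only [List.zip_nil_right, List.foldl_nil, pvSplitFrom]
    split <;> simp
  | cons b t ih =>
    intro a tmp out
    simp only [List.zip_cons_cons, List.foldl_cons, pvSplitFrom]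
    by_cases h : |b.2 - a.2| ≤ thr
    · simp only [h, if_pos]
      exact ih b (tmp ++ [b]) out
    · simp only [h, if_neg, not_false_iff]
      rw [show ((if tmp.length > 1 then out ++ [tmp] else out, ([b] : List (Int × Int))))
            = ((out ++ if tmp.length > 1 then [tmp] else []), [b]) by split <;> simp]
      rw [ih b [b] (out ++ if tmp.length > 1 then [tmp] else [])]
      simp

theorem pvBrkNat (thr : Int) (t : List (Int × Int)) : ∀ (a : Int × Int),
    ((List.range t.length).filter (fun k =>
        decide (thr < |((a :: t).getD (k + 1) (0, 0)).2 - ((a :: t).getD k (0, 0)).2|))).map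
      (fun k : Nat => ((k : Int) + 1)) = pvBrk thr a t := by
  induction t with
  | nil => intro a; simp [pvBrk]
  | cons b t ih =>
    intro a
    rw [List.length_cons, List.range_succ_eq_map, List.filter_cons, List.filter_map]
    have hfil : ((fun k => decide (thr < |((a :: b :: t).getD (k + 1) (0, 0)).2 - ((a :: b :: t).getD k (0, 0)).2|)) ∘ Nat.succ)
        = (fun k => decide (thr < |((b :: t).getD (k + 1) (0, 0)).2 - ((b :: t).getD k (0, 0)).2|)) := by
      funext k; simp [Function.comp]
    rw [hfil]
    have hmap : ∀ Y : List Nat, Y.map ((fun k : Nat => ((k : Int) + 1)) ∘ Nat.succ)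
        = (Y.map (fun k : Nat => ((k : Int) + 1))).map (· + 1) := by
      intro Y; rw [List.map_map]
      exact List.map_congr_left (fun x _ => by simp only [Function.comp_apply]; omega)
    by_cases hb : thr < |b.2 - a.2|
    · rw [if_pos (by simp [hb])]
      rw [List.map_cons, List.map_map, hmap, ih b]
      simp [pvBrk, hb]
    · rw [if_neg (by simp [hb])]
      rw [List.map_map, hmap, ih b]
      simp [pvBrk, hb]

theorem pvMainB (thr : Int) (t : List (Int × Int)) : ∀ (a : Int × Int)
    (q₀ q₁ : List (Int × Int)) (out : List (List (Int × Int))) (c N : Int),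
    c = (q₀.length : Int) + q₁.length → N = c + 1 + t.length →
    (((((q₀.length : Int) :: (pvBrk thr a t).map (· + c) ++ [N])).zip
        (((q₀.length : Int) :: (pvBrk thr a t).map (· + c) ++ [N]).tail)).foldl (fun out se =>
      let seg := PySem.List.slice (q₀ ++ q₁ ++ a :: t) (some se.1) (some se.2)
      if seg.length > 1 then out ++ [seg] else out) out)
    = out ++ pvSplitFrom thr (q₁ ++ [a]) a t := by
  induction t with
  | nil =>
    intro a q₀ q₁ out c N hc hN
    subst hc hN
    have h1 : ((q₀.length : Int) + q₁.length + 1 + ([] : List (Int × Int)).length) = ((q₀.length + (q₁.length + 1) : Nat) : Int) := by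
      push_cast; simp; ring
    simp only [pvBrk, List.map_nil, h1]
    simp only [List.singleton_append, List.tail_cons, List.zip_cons_cons, List.zip_nil_right, List.foldl_cons, List.foldl_nil]
    rw [PySem.List.slice_natCast]
    have h2 : ((q₀ ++ q₁ ++ [a]).drop q₀.length).take (q₀.length + (q₁.length + 1) - q₀.length) = q₁ ++ [a] := by
      rw [List.append_assoc, List.drop_left]
      simp
    rw [h2]
    simp only [pvSplitFrom]
    split <;> simp
  | cons b t ih =>
    intro a q₀ q₁ out c N hc hN
    by_cases hb : thr < |b.2 - a.2|
    · simp only [pvBrk, if_pos hb, List.map_cons,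
        List.cons_append, List.zip_cons_cons, List.tail_cons, List.foldl_cons]
      have h1 : (1 : Int) + c = ((q₀.length + (q₁.length + 1) : Nat) : Int) := by
        subst hc; push_cast; ring
      rw [h1, PySem.List.slice_natCast]
      have h2 : ((q₀ ++ q₁ ++ a :: b :: t).drop q₀.length).take (q₀.length + (q₁.length + 1) - q₀.length) = q₁ ++ [a] := by
        rw [List.append_assoc, List.drop_left, Nat.add_sub_cancel_left]
        rw [show q₁ ++ a :: b :: t = (q₁ ++ [a]) ++ (b :: t) by simp]
        exact List.take_left' (by simp)
      rw [h2]
      simp only [List.nil_append, List.map_map]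
      have hfun : ((fun x : Int => x + c) ∘ (fun x : Int => x + 1)) = (fun x : Int => x + (c + 1)) := by
        funext x; simp [Function.comp]; ring
      rw [hfun]
      have hih := ih b (q₀ ++ q₁ ++ [a]) [] (if (q₁ ++ [a]).length > 1 then out ++ [q₁ ++ [a]] else out) (c + 1) N
        (by subst hc; simp; push_cast; ring) (by subst hN; simp; push_cast; ring)
      simp only [List.length_append, List.length_cons, List.length_nil, List.nil_append,
        List.append_assoc, List.cons_append, List.tail_cons] at hih ⊢
      rw [show ((q₀.length + (q₁.length + 1) : Nat) : Int) = ((q₀.length + q₁.length + 1 : Nat) : Int) by push_cast; ring] at *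
      rw [hih]
      have hsplit : pvSplitFrom thr (q₁ ++ [a]) a (b :: t) = (if (q₁ ++ [a]).length > 1 then [q₁ ++ [a]] else []) ++ pvSplitFrom thr [b] b t := by
        rw [pvSplitFrom, if_neg (not_le.mpr hb)]
      rw [hsplit]
      split <;> rename_i h <;> simp at h <;> simp [h]
    · simp only [pvBrk, if_neg hb, List.nil_append, List.map_map]
      have hfun : ((fun x : Int => x + c) ∘ (fun x : Int => x + 1)) = (fun x : Int => x + (c + 1)) := by
        funext x; simp [Function.comp]; ring
      rw [hfun]
      have hih := ih b q₀ (q₁ ++ [a]) out (c + 1) N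
        (by subst hc; simp; push_cast; ring) (by subst hN; simp; push_cast; ring)
      simp only [List.append_assoc, List.cons_append, List.nil_append, List.tail_cons] at hih ⊢
      rw [hih]
      have hsplit : pvSplitFrom thr (q₁ ++ [a]) a (b :: t) = pvSplitFrom thr (q₁ ++ [a] ++ [b]) b t := by
        rw [pvSplitFrom, if_pos (not_lt.mp hb)]
      simp only [List.append_assoc, List.singleton_append] at hsplit
      rw [hsplit]

theorem pvBodyEq (thr : Int) (cnt : List (Int × Int)) (hcnt : cnt ≠ []) (out : List (List (Int × Int))) :
    (let st := (cnt.zip (PySem.List.slice cnt (some 1) none)).foldl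
      (fun (st : List (List (Int × Int)) × List (Int × Int)) ab =>
        if |ab.2.2 - ab.1.2| ≤ thr then (st.1, st.2 ++ [ab.2])
        else (if st.2.length > 1 then st.1 ++ [st.2] else st.1, [ab.2]))
      (out, [(PySem.List.pyGet? cnt 0).getD (0, 0)])
     if st.2.length > 1 then st.1 ++ [st.2] else st.1)
    = (let n : Int := cnt.length
       let breaks : List Int :=
        ((PySem.List.pyRange 0 (n - 1) 1).filter (fun i =>
          decide (thr < |(PySem.List.pyGetD cnt (i + 1) (0, 0)).2 - (PySem.List.pyGetD cnt i (0, 0)).2|))).map (· + 1)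
       let bounds : List Int := [0] ++ breaks ++ [n]
       (bounds.zip (PySem.List.slice bounds (some 1) none)).foldl (fun out se =>
        let seg := PySem.List.slice cnt (some se.1) (some se.2)
        if seg.length > 1 then out ++ [seg] else out) out) := by
  obtain ⟨a, t, rfl⟩ : ∃ a t, cnt = a :: t := by
    cases cnt with
    | nil => exact absurd rfl hcnt
    | cons a t => exact ⟨a, t, rfl⟩
  -- A side
  rw [show PySem.List.slice (a :: t) (some 1) none = t from PySem.List.slice_from_one (a :: t) ▸ rfl]
  rw [show (PySem.List.pyGet? (a :: t) 0).getD (0, 0) = a by simp]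
  rw [pvMainA thr t a [a] out]
  -- B side
  dsimp only
  have hn : ((a :: t).length : Int) - 1 = (t.length : Int) := by simp
  rw [hn]
  rw [PySem.List.pyRange_one]
  simp only [sub_zero, Int.toNat_natCast, zero_add]
  rw [List.filter_map]
  have hP : ((fun i => decide (thr < |(PySem.List.pyGetD (a :: t) (i + 1) (0, 0)).2 - (PySem.List.pyGetD (a :: t) i (0, 0)).2|)) ∘ (fun k : Nat => (k : Int)))
      = (fun k => decide (thr < |((a :: t).getD (k + 1) (0, 0)).2 - ((a :: t).getD k (0, 0)).2|)) := by
    funext k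
    have h1 : ((k : Int) + 1) = ((k + 1 : Nat) : Int) := by push_cast; ring
    simp only [Function.comp_apply]
    rw [h1]
    simp only [PySem.List.pyGetD_natCast]
  rw [hP]
  rw [List.map_map]
  have hmap2 : (List.map ((fun x : Int => x + 1) ∘ (fun k : Nat => (k : Int)))
      (List.filter (fun k => decide (thr < |((a :: t).getD (k + 1) (0, 0)).2 - ((a :: t).getD k (0, 0)).2|)) (List.range t.length)))
      = pvBrk thr a t := by
    rw [← pvBrkNat thr t a]
    exact List.map_congr_left (fun x _ => by simp [Function.comp])
  rw [hmap2]
  have hB := pvMainB thr t a [] [] out 0 ((t.length : Int) + 1) (by simp) (by ring)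
  simp only [List.length_nil, Nat.cast_zero, add_zero, List.nil_append] at hB
  simp only [List.map_id'] at hB
  simp only [List.singleton_append]
  rw [PySem.List.slice_from_one]
  rw [show ((a :: t).length : Int) = (t.length : Int) + 1 by simp]
  exact hB.symm

theorem pvTop (contours : List (List (Int × Int))) (thr : Int) (hpre : [] ∉ contours) :
    split_by_threshold_py contours thr = split_by_threshold_py_alt contours thr := by
  unfold split_by_threshold_py split_by_threshold_py_alt
  apply PySem.List.foldl_congr_mem
  intro acc cnt hm
  exact pvBodyEq thr cnt (fun he => hpre (he ▸ hm)) acc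

-- ===== VERDICT (by name: the statement is the Claim_ definition above) =====
theorem split_by_threshold_py_spec : Claim_equal_split_by_threshold_py := by
  intro contours thr _ hpre
  unfold Spec_split_by_threshold_py
  exact pvTop contours thr hpre
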